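-- pv_equiv track=rewrite | github.com/MathieuTurcotte/msparser | msprint.py | inst_unit_scaling
-- ===== SOURCE A (Python) =====
-- def inst_unit_scaling(peak):
--     """
--     Given the peak instruction value to plot, get a scaling factor which will
--     divide the data point and the resulting unit name. Those informations is
--     used to scale the data and set the axis label in the print_gnuplot_script
--     function.
--     """
--
--     unit_table = [
--         (2 ** 0, "i"),
--         (2 ** 10, "ki"),
--         (2 ** 20, "Mi"),
--         (2 ** 30, "Gi"),
--         (2 ** 40, "Ti"),
--         (2 ** 50, "Pi"),
--         (2 ** 60, "Ei")
--     ]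
--
--     for value, name in unit_table:
--         if peak // value < 2 ** 10:
--             return (value, name)
-- ===== SOURCE B (Python) =====
-- def inst_unit_scaling(peak):
--     """Repeated floor-division unit scaling: count how many times peak
--     divides by 1024 before falling below 1024, then index a name list."""
--     names = ["i", "ki", "Mi", "Gi", "Ti", "Pi", "Ei"]
--     p = peak
--     i = 0
--     while p >= 1024:
--         p //= 1024
--         i += 1
--     if i < 7:
--         return (1024 ** i, names[i])
--     return None
-- ===== Notes on version B (the rewrite author's own statement) =====
-- stated objective: idiomatic
-- what changed: Replaces the precomputed 7-entry unit table scanned with a quotient test per entry by the standard unit-scaling idiom: repeatedly floor-divide the peak by 1024 counting steps, then return (1024**i, names[i]).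
import Mathlib
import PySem

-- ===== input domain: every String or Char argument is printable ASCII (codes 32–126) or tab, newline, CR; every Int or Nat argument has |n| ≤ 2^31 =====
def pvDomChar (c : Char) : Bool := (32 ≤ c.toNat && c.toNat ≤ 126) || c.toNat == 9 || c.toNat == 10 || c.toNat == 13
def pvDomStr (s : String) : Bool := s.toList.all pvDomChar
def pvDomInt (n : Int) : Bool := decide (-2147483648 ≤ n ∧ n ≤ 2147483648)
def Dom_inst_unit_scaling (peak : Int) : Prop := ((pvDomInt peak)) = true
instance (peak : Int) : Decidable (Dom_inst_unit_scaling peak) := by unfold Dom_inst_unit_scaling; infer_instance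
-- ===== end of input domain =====

-- B replaces A's scan over a precomputed unit table by the idiomatic repeated
-- floor-division loop (count divisions by 1024, then index a name list); same cost.


-- ===== PORT A =====
-- the for-loop over unit_table; Python falls through (returns None) on an
-- empty remainder — unreachable for |peak| ≤ 2^31, (0, "") stands in there
def pvScanTable (peak : Int) : List (Int × String) → Int × String
  | [] => (0, "")
  | (value, name) :: rest =>
      if PySem.Int.floordiv peak value < 1024 then (value, name)
      else pvScanTable peak rest

def inst_unit_scaling (peak : Int) : Int × String :=
  let unit_table : List (Int × String) :=
    [(1, "i"), (1024, "ki"), (1048576, "Mi"), (1073741824, "Gi"),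
     (1099511627776, "Ti"), (1125899906842624, "Pi"), (1152921504606846976, "Ei")]
  pvScanTable peak unit_table

-- ===== PORT B =====
-- the while loop: divide p by 1024 until p < 1024, counting steps
def pvAltLoop (p : Int) (i : Nat) : Nat :=
  if h : 1024 ≤ p then pvAltLoop (PySem.Int.floordiv p 1024) (i + 1) else i
termination_by p.toNat
decreasing_by
  have h2 : PySem.Int.floordiv p 1024 = p / 1024 :=
    PySem.Int.floordiv_eq_ediv_of_pos (by norm_num)
  rw [h2]; omega

def inst_unit_scaling_alt (peak : Int) : Int × String :=
  let names : List String := ["i", "ki", "Mi", "Gi", "Ti", "Pi", "Ei"]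
  let i := pvAltLoop peak 0
  if i < 7 then ((1024 : Int) ^ i, names.getD i "")
  else (0, "")  -- Python returns None here; unreachable for |peak| ≤ 2^31

-- ===== PRECONDITION & SPEC =====
def Spec_inst_unit_scaling (peak : Int) (out : Int × String) : Prop := out = inst_unit_scaling_alt peak
instance (peak : Int) (out : Int × String) : Decidable (Spec_inst_unit_scaling peak out) := by unfold Spec_inst_unit_scaling; infer_instance

-- ===== CLAIM (what is proved, stated in full; the proofs are below) =====
def Claim_equal_inst_unit_scaling : Prop := ∀ (peak : Int), Dom_inst_unit_scaling peak → Spec_inst_unit_scaling peak (inst_unit_scaling peak)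

-- ===== LEMMAS AND PROOFS =====

theorem pvAltLoop_step (p : Int) (i : Nat) (h : 1024 ≤ p) :
    pvAltLoop p i = pvAltLoop (p / 1024) (i + 1) := by
  rw [pvAltLoop, dif_pos h, PySem.Int.floordiv_eq_ediv_of_pos (by norm_num)]

theorem pvAltLoop_stop (p : Int) (i : Nat) (h : p < 1024) : pvAltLoop p i = i := by
  rw [pvAltLoop, dif_neg (by omega)]

-- ===== VERDICT =====
theorem inst_unit_scaling_spec : Claim_equal_inst_unit_scaling := by
  intro peak hdom
  unfold Spec_inst_unit_scaling
  simp only [Dom_inst_unit_scaling, pvDomInt, decide_eq_true_eq] at hdom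
  have hf1 : PySem.Int.floordiv peak 1 = peak := by
    rw [PySem.Int.floordiv_eq_ediv_of_pos (by norm_num)]; omega
  have hfk : ∀ q : Int, PySem.Int.floordiv q 1024 = q / 1024 :=
    fun q => PySem.Int.floordiv_eq_ediv_of_pos (by norm_num)
  have hfM : PySem.Int.floordiv peak 1048576 = peak / 1048576 :=
    PySem.Int.floordiv_eq_ediv_of_pos (by norm_num)
  have hfG : PySem.Int.floordiv peak 1073741824 = peak / 1073741824 :=
    PySem.Int.floordiv_eq_ediv_of_pos (by norm_num)
  by_cases h0 : peak < 1024
  · have hb : pvAltLoop peak 0 = 0 := pvAltLoop_stop _ _ h0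
    simp [inst_unit_scaling, inst_unit_scaling_alt, pvScanTable, hb, hf1, h0]
  · by_cases h1 : peak < 1048576
    · have hb : pvAltLoop peak 0 = 1 := by
        rw [pvAltLoop_step _ _ (by omega), pvAltLoop_stop _ _ (by omega)]
      simp [inst_unit_scaling, inst_unit_scaling_alt, pvScanTable, hb, hf1, hfk, h0]
      omega
    · by_cases h2 : peak < 1073741824
      · have hb : pvAltLoop peak 0 = 2 := by
          rw [pvAltLoop_step _ _ (by omega), pvAltLoop_step _ _ (by omega),
              pvAltLoop_stop _ _ (by omega)]
        simp [inst_unit_scaling, inst_unit_scaling_alt, pvScanTable, hb, hf1, hfk, hfM, h0]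
        rw [if_neg (by omega), if_pos (by omega)]
      · have hb : pvAltLoop peak 0 = 3 := by
          rw [pvAltLoop_step _ _ (by omega), pvAltLoop_step _ _ (by omega),
              pvAltLoop_step _ _ (by omega), pvAltLoop_stop _ _ (by omega)]
        simp [inst_unit_scaling, inst_unit_scaling_alt, pvScanTable, hb, hf1, hfk, hfM, hfG, h0]
        rw [if_neg (by omega), if_neg (by omega), if_pos (by omega)]
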